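-- pv_equiv track=rewrite | github.com/MasonSanders/Hand-Feature-Vectors | featurevectors.py | get_landmarks
-- ===== SOURCE A (Python) =====
-- def get_landmarks(profile):
--     start = 0
--     end = 0
--
--     # initial value arrays for min and max
--     max_val = [0] * len(profile)
--     min_val = [0] * len(profile)
--     max_index = [0] * len(profile)
--     min_index = [0] * len(profile)
--
--     # slide the window and decide minimum and maximum values
--     for i in range(len(profile)):
--         win_start = max(0, i - 2)
--         win_end = min(len(profile) - 1, i + 2)
--         profile_win = profile[win_start : win_end + 1]
--         max_val[i] = max(profile_win)
--         max_index[i] = win_start + profile_win.index(max_val[i])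
--         min_val[i] = min(profile_win)
--         min_index[i] = win_start + profile_win.index(min_val[i])
--
--     # decide Ps and Pe
--     for k in range(len(profile)):
--         for i in range(len(profile)):
--             if i != k:
--                 if min_index[k] > max_index[k]:
--                     if (max_val[k] - min_val[k]) > (max_val[i] - min_val[i]):
--                         # if the difference between max and min at k is greater than the difference
--                         # of max and min at start, set start to k
--                         if (max_val[k] - min_val[k]) > (max_val[start] - min_val[start]):
--                             start = k
--                 if max_index[k] > min_index[k]:
--                     if (max_val[k] - min_val[k]) > (max_val[i] - min_val[i]):
--                         # if the difference between max and min at k is greater than the difference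
--                         # of max and min at end, set start to k
--                         if (max_val[k] - min_val[k]) > (max_val[end] - min_val[end]):
--                             end = k
--
--     # create a landmark vector with
--     # end - start is the number of pixels that the feature takes up
--     landmark_vector = (start, end)
--     return landmark_vector
-- ===== SOURCE B (Python) =====
-- def get_landmarks(profile):
--     n = len(profile)
--     if n == 0:
--         return (0, 0)
--
--     # one pass: per-index window diff and the two positional flags
--     diffs = []
--     start_flag = []   # min_index > max_index at this position
--     end_flag = []     # max_index > min_index at this position
--     for i in range(n):
--         lo = max(0, i - 2)
--         hi = min(n - 1, i + 2)
--         win = profile[lo:hi + 1]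
--         mx = max(win)
--         mn = min(win)
--         mxi = lo + win.index(mx)
--         mni = lo + win.index(mn)
--         diffs.append(mx - mn)
--         start_flag.append(mni > mxi)
--         end_flag.append(mxi > mni)
--
--     # a position k qualifies iff some other position has a strictly smaller
--     # diff, i.e. iff diffs[k] is strictly above the global minimum diff
--     mind = min(diffs)
--     start = 0
--     end = 0
--     for k in range(n):
--         if diffs[k] > mind:
--             if start_flag[k] and diffs[k] > diffs[start]:
--                 start = k
--             if end_flag[k] and diffs[k] > diffs[end]:
--                 end = k
--     return (start, end)
-- ===== Notes on version B (the rewrite author's own statement) =====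
-- stated objective: faster
-- what changed: A's quadratic second pass scans all other indices for each k to test whether some index has a strictly smaller window diff; B precomputes the global minimum diff once and replaces that inner scan by a single comparison diffs[k] > min(diffs), turning the second pass into one linear loop.
import Mathlib
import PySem

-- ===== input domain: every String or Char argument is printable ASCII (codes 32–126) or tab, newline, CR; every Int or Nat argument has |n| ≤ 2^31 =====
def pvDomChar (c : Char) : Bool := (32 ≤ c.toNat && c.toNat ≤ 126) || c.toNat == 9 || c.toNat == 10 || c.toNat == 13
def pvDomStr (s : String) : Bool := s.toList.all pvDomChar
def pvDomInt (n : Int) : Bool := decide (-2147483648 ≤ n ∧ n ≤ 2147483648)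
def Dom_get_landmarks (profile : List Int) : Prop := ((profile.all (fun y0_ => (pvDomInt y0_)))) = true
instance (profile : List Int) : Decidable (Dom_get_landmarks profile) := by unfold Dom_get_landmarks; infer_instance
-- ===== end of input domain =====

-- B replaces A's inner existence scan over all other indices by one comparison of the
-- window diff against the precomputed global minimum diff (objective: faster).

-- ===== PORT A =====
-- window statistics of one iteration of the first pass (this first pass is identical in
-- Source A and Source B, so both ports share it):
-- (max(win), win_start + win.index(max), min(win), win_start + win.index(min))
def pvWinStats (profile : List Int) (i : Nat) : Int × Nat × Int × Nat :=
  let ws : Nat := i - 2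
  let we : Nat := min (profile.length - 1) (i + 2)
  let win := PySem.List.slice profile (some (ws : Int)) (some ((we + 1 : Nat) : Int))
  let mxv := (PySem.List.max? win (fun x => x)).getD 0
  let mxi := ws + (PySem.List.index? win mxv).getD 0
  let mnv := (PySem.List.min? win (fun x => x)).getD 0
  let mni := ws + (PySem.List.index? win mnv).getD 0
  (mxv, mxi, mnv, mni)

-- A's four arrays
def pvMaxVal (profile : List Int) : List Int :=
  (List.range profile.length).map (fun i => (pvWinStats profile i).1)
def pvMaxIndex (profile : List Int) : List Nat :=
  (List.range profile.length).map (fun i => (pvWinStats profile i).2.1)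
def pvMinVal (profile : List Int) : List Int :=
  (List.range profile.length).map (fun i => (pvWinStats profile i).2.2.1)
def pvMinIndex (profile : List Int) : List Nat :=
  (List.range profile.length).map (fun i => (pvWinStats profile i).2.2.2)

-- A's nested second pass over (start, end)
def pvLoopA (profile : List Int) : Nat × Nat :=
  (List.range profile.length).foldl (fun (se : Nat × Nat) k =>
    (List.range profile.length).foldl (fun (se : Nat × Nat) i =>
      if i ≠ k then
        ((if (pvMinIndex profile).getD k 0 > (pvMaxIndex profile).getD k 0 ∧
             (pvMaxVal profile).getD k 0 - (pvMinVal profile).getD k 0 >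
               (pvMaxVal profile).getD i 0 - (pvMinVal profile).getD i 0 ∧
             (pvMaxVal profile).getD k 0 - (pvMinVal profile).getD k 0 >
               (pvMaxVal profile).getD se.1 0 - (pvMinVal profile).getD se.1 0
          then k else se.1),
         (if (pvMaxIndex profile).getD k 0 > (pvMinIndex profile).getD k 0 ∧
             (pvMaxVal profile).getD k 0 - (pvMinVal profile).getD k 0 >
               (pvMaxVal profile).getD i 0 - (pvMinVal profile).getD i 0 ∧
             (pvMaxVal profile).getD k 0 - (pvMinVal profile).getD k 0 >
               (pvMaxVal profile).getD se.2 0 - (pvMinVal profile).getD se.2 0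
          then k else se.2))
      else se) se) ((0, 0) : Nat × Nat)

def get_landmarks (profile : List Int) : List Int :=
  [((pvLoopA profile).1 : Int), ((pvLoopA profile).2 : Int)]

-- ===== PORT B =====
-- Source B's one-pass arrays: per-index diff and the two positional flags
def pvDiffs (profile : List Int) : List Int :=
  (List.range profile.length).map (fun i =>
    (pvWinStats profile i).1 - (pvWinStats profile i).2.2.1)
def pvStartFlag (profile : List Int) : List Bool :=
  (List.range profile.length).map (fun i =>
    decide ((pvWinStats profile i).2.2.2 > (pvWinStats profile i).2.1))
def pvEndFlag (profile : List Int) : List Bool :=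
  (List.range profile.length).map (fun i =>
    decide ((pvWinStats profile i).2.1 > (pvWinStats profile i).2.2.2))

-- min(diffs)
def pvMind (profile : List Int) : Int :=
  (PySem.List.min? (pvDiffs profile) (fun x => x)).getD 0

-- Source B's single linear pass over (start, end)
def pvLoopB (profile : List Int) : Nat × Nat :=
  (List.range profile.length).foldl (fun (se : Nat × Nat) k =>
    if (pvDiffs profile).getD k 0 > pvMind profile then
      ((if (pvStartFlag profile).getD k false ∧
           (pvDiffs profile).getD k 0 > (pvDiffs profile).getD se.1 0 then k else se.1),
       (if (pvEndFlag profile).getD k false ∧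
           (pvDiffs profile).getD k 0 > (pvDiffs profile).getD se.2 0 then k else se.2))
    else se) ((0, 0) : Nat × Nat)

def get_landmarks_alt (profile : List Int) : List Int :=
  if profile.length = 0 then [0, 0]
  else [((pvLoopB profile).1 : Int), ((pvLoopB profile).2 : Int)]

-- ===== PRECONDITION & SPEC =====
def Spec_get_landmarks (profile : List Int) (out : List Int) : Prop := out = get_landmarks_alt profile
instance (profile : List Int) (out : List Int) : Decidable (Spec_get_landmarks profile out) := by unfold Spec_get_landmarks; infer_instance

-- ===== CLAIM (what is proved, stated in full; the proofs are below) =====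
def Claim_equal_get_landmarks : Prop := ∀ (profile : List Int), Dom_get_landmarks profile → Spec_get_landmarks profile (get_landmarks profile)

-- ===== LEMMAS AND PROOFS =====

-- once the accumulator has become k, the one-component update loop keeps it k
theorem pv_foldl_fix (D : Nat → Int) (C : Prop) [Decidable C] (k : Nat) (l : List Nat) :
    l.foldl (fun s i => if i ≠ k ∧ C ∧ D k > D i ∧ D k > D s then k else s) k = k := by
  induction l with
  | nil => rfl
  | cons i l ih => simpa using ih

-- A's inner existence loop on ONE component computes a single conditional assignment
theorem pv_inner_char (D : Nat → Int) (C : Prop) [Decidable C] (k : Nat) (l : List Nat) (s : Nat) :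
    l.foldl (fun s i => if i ≠ k ∧ C ∧ D k > D i ∧ D k > D s then k else s) s
      = if C ∧ (∃ i ∈ l, i ≠ k ∧ D k > D i) ∧ D k > D s then k else s := by
  induction l generalizing s with
  | nil => simp
  | cons i l ih =>
    by_cases h : i ≠ k ∧ C ∧ D k > D i ∧ D k > D s
    · rw [List.foldl_cons, if_pos h, pv_foldl_fix]
      rw [if_pos ⟨h.2.1, ⟨i, by simp, h.1, h.2.2.1⟩, h.2.2.2⟩]
    · rw [List.foldl_cons, if_neg h, ih]
      have hiff : (C ∧ (∃ j ∈ i :: l, j ≠ k ∧ D k > D j) ∧ D k > D s)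
          ↔ (C ∧ (∃ j ∈ l, j ≠ k ∧ D k > D j) ∧ D k > D s) := by
        constructor
        · rintro ⟨hc, ⟨j, hj, hjk, hlt⟩, hs⟩
          rcases List.mem_cons.1 hj with rfl | hj'
          · exact absurd ⟨hjk, hc, hlt, hs⟩ h
          · exact ⟨hc, ⟨j, hj', hjk, hlt⟩, hs⟩
        · rintro ⟨hc, ⟨j, hj, hjk, hlt⟩, hs⟩
          exact ⟨hc, ⟨j, List.mem_cons_of_mem _ hj, hjk, hlt⟩, hs⟩
      rw [if_congr hiff rfl rfl]

-- the paired version of A's inner loop (start and end evolve independently)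
theorem pv_inner_pair (D : Nat → Int) (CS CE : Prop) [Decidable CS] [Decidable CE]
    (k : Nat) (l : List Nat) (se : Nat × Nat) :
    l.foldl (fun (se : Nat × Nat) i =>
        if i ≠ k then
          ((if CS ∧ D k > D i ∧ D k > D se.1 then k else se.1),
           (if CE ∧ D k > D i ∧ D k > D se.2 then k else se.2))
        else se) se
      = ((if CS ∧ (∃ i ∈ l, i ≠ k ∧ D k > D i) ∧ D k > D se.1 then k else se.1),
         (if CE ∧ (∃ i ∈ l, i ≠ k ∧ D k > D i) ∧ D k > D se.2 then k else se.2)) := by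
  rcases se with ⟨a, b⟩
  have hstep : (fun (se : Nat × Nat) i =>
        if i ≠ k then
          ((if CS ∧ D k > D i ∧ D k > D se.1 then k else se.1),
           (if CE ∧ D k > D i ∧ D k > D se.2 then k else se.2))
        else se)
      = fun (se : Nat × Nat) i =>
          ((fun s i => if i ≠ k ∧ CS ∧ D k > D i ∧ D k > D s then k else s) se.1 i,
           (fun s i => if i ≠ k ∧ CE ∧ D k > D i ∧ D k > D s then k else s) se.2 i) := by
    funext se i
    by_cases h : i ≠ k
    · simp [h]
    · simp [h]
  rw [hstep, PySem.List.foldl_prod_mk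
    (f := fun s i => if i ≠ k ∧ CS ∧ D k > D i ∧ D k > D s then k else s)
    (g := fun s i => if i ≠ k ∧ CE ∧ D k > D i ∧ D k > D s then k else s),
    pv_inner_char, pv_inner_char]

-- "some other index has a strictly smaller diff" ⟺ "diff is above the global minimum"
theorem pv_exists_iff_gt_min (diffs : List Int) (k : Nat) (hk : k < diffs.length) :
    ((∃ i ∈ List.range diffs.length, i ≠ k ∧ diffs.getD k 0 > diffs.getD i 0)
      ↔ diffs.getD k 0 > (PySem.List.min? diffs (fun x => x)).getD 0) := by
  have hne : diffs ≠ [] := by intro h; simp [h] at hk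
  obtain ⟨m, hm⟩ : ∃ m, PySem.List.min? diffs (fun x => x) = some m := by
    cases h : PySem.List.min? diffs (fun x => x) with
    | none => exact absurd ((PySem.List.min?_eq_none_iff _ _).1 h) hne
    | some m => exact ⟨m, rfl⟩
  rw [hm]
  constructor
  · rintro ⟨i, hi, _, hlt⟩
    have hi' : i < diffs.length := List.mem_range.1 hi
    have := PySem.List.min?_isMin hm (diffs.getD i 0)
      (by rw [List.getD_eq_getElem _ _ hi']; exact List.getElem_mem hi')
    simpa using lt_of_le_of_lt this hlt
  · intro hgt
    obtain ⟨i, hi', hieq⟩ := List.mem_iff_getElem.1 (PySem.List.min?_mem hm)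
    refine ⟨i, List.mem_range.2 hi', ?_, ?_⟩
    · intro h; subst h
      rw [List.getD_eq_getElem _ _ hi', hieq] at hgt
      exact lt_irrefl _ hgt
    · rw [List.getD_eq_getElem _ _ hi', hieq]
      simpa using hgt

-- A's diff lookup agrees with Source B's diffs array at EVERY index (both default to 0)
theorem pv_diff_lookup (profile : List Int) (j : Nat) :
    (pvMaxVal profile).getD j 0 - (pvMinVal profile).getD j 0 = (pvDiffs profile).getD j 0 := by
  by_cases hj : j < profile.length
  · rw [pvMaxVal, pvMinVal, pvDiffs,
      PySem.List.getD_map_range _ _ _ _ hj, PySem.List.getD_map_range _ _ _ _ hj,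
      PySem.List.getD_map_range _ _ _ _ hj]
  · rw [pvMaxVal, pvMinVal, pvDiffs,
      List.getD_eq_default _ _ (by simpa using le_of_not_gt hj),
      List.getD_eq_default _ _ (by simpa using le_of_not_gt hj),
      List.getD_eq_default _ _ (by simpa using le_of_not_gt hj)]
    rfl

-- the two loops agree
theorem pv_loop_eq (profile : List Int) : pvLoopA profile = pvLoopB profile := by
  rw [pvLoopA, pvLoopB]
  apply PySem.List.foldl_congr_mem
  intro se k hk
  have hk' : k < profile.length := List.mem_range.1 hk
  refine (pv_inner_pair
      (fun j => (pvMaxVal profile).getD j 0 - (pvMinVal profile).getD j 0)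
      ((pvMinIndex profile).getD k 0 > (pvMaxIndex profile).getD k 0)
      ((pvMaxIndex profile).getD k 0 > (pvMinIndex profile).getD k 0)
      k (List.range profile.length) se).trans ?_
  have hlen : (pvDiffs profile).length = profile.length := by
    rw [pvDiffs]; simp
  have hCS : ((pvMinIndex profile).getD k 0 > (pvMaxIndex profile).getD k 0)
      ↔ ((pvStartFlag profile).getD k false = true) := by
    rw [pvMinIndex, pvMaxIndex, pvStartFlag,
      PySem.List.getD_map_range _ _ _ _ hk', PySem.List.getD_map_range _ _ _ _ hk',
      PySem.List.getD_map_range _ _ _ _ hk', decide_eq_true_eq]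
  have hCE : ((pvMaxIndex profile).getD k 0 > (pvMinIndex profile).getD k 0)
      ↔ ((pvEndFlag profile).getD k false = true) := by
    rw [pvMinIndex, pvMaxIndex, pvEndFlag,
      PySem.List.getD_map_range _ _ _ _ hk', PySem.List.getD_map_range _ _ _ _ hk',
      PySem.List.getD_map_range _ _ _ _ hk', decide_eq_true_eq]
  simp only [pv_diff_lookup]
  have hEx' : (∃ i ∈ List.range profile.length, i ≠ k ∧
        (pvDiffs profile).getD k 0 > (pvDiffs profile).getD i 0)
      ↔ (pvDiffs profile).getD k 0 > pvMind profile := by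
    rw [pvMind]
    have h := pv_exists_iff_gt_min (pvDiffs profile) k (by rwa [hlen])
    rwa [hlen] at h
  by_cases hgt : (pvDiffs profile).getD k 0 > pvMind profile
  · rw [if_pos hgt]
    have hex := hEx'.2 hgt
    have h1 : ((pvMinIndex profile).getD k 0 > (pvMaxIndex profile).getD k 0 ∧
        (∃ i ∈ List.range profile.length, i ≠ k ∧
          (pvDiffs profile).getD k 0 > (pvDiffs profile).getD i 0) ∧
        (pvDiffs profile).getD k 0 > (pvDiffs profile).getD se.1 0)
        ↔ ((pvStartFlag profile).getD k false = true ∧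
           (pvDiffs profile).getD k 0 > (pvDiffs profile).getD se.1 0) := by
      constructor
      · rintro ⟨a1, _, a3⟩; exact ⟨hCS.1 a1, a3⟩
      · rintro ⟨a1, a3⟩; exact ⟨hCS.2 a1, hex, a3⟩
    have h2 : ((pvMaxIndex profile).getD k 0 > (pvMinIndex profile).getD k 0 ∧
        (∃ i ∈ List.range profile.length, i ≠ k ∧
          (pvDiffs profile).getD k 0 > (pvDiffs profile).getD i 0) ∧
        (pvDiffs profile).getD k 0 > (pvDiffs profile).getD se.2 0)
        ↔ ((pvEndFlag profile).getD k false = true ∧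
           (pvDiffs profile).getD k 0 > (pvDiffs profile).getD se.2 0) := by
      constructor
      · rintro ⟨a1, _, a3⟩; exact ⟨hCE.1 a1, a3⟩
      · rintro ⟨a1, a3⟩; exact ⟨hCE.2 a1, hex, a3⟩
    rw [if_congr h1 rfl rfl, if_congr h2 rfl rfl]
  · rw [if_neg hgt]
    have hex : ¬ (∃ i ∈ List.range profile.length, i ≠ k ∧
        (pvDiffs profile).getD k 0 > (pvDiffs profile).getD i 0) := fun h => hgt (hEx'.1 h)
    rw [if_neg (fun h => hex h.2.1), if_neg (fun h => hex h.2.1)]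

theorem get_landmarks_eq (profile : List Int) :
    get_landmarks profile = get_landmarks_alt profile := by
  rw [get_landmarks, get_landmarks_alt, pv_loop_eq]
  by_cases hn : profile.length = 0
  · rw [if_pos hn]
    have : profile = [] := List.length_eq_zero_iff.1 hn
    subst this
    rfl
  · rw [if_neg hn]

-- ===== VERDICT (by name: the statement is the Claim_ definition above) =====
theorem get_landmarks_spec : Claim_equal_get_landmarks := by
  intro profile _
  unfold Spec_get_landmarks
  exact get_landmarks_eq profile
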